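-- pv_equiv track=rewrite | github.com/Pix3Ld/encrypted-notepad | application/common/utils.py | tags_to_list
-- ===== SOURCE A (Python) =====
-- from typing import Optional, List
--
-- def tags_to_list(tags: Optional[str]) -> List[str]:
--     if not tags:
--         return []
--
--     raw = [
--         p.strip()
--         for part in tags.replace(";", ",").split(";")
--         for p in part.split(",")
--     ]
--
--     output: List[str] = []
--     for item in raw:
--         if not item:
--             continue
--         output.extend([t for t in item.split() if t])
--
--     return [t.lower() for t in output]
-- ===== SOURCE B (Python) =====
-- def tags_to_list(tags):
--     # Single character-level pass: scan once, cutting tokens at ',', ';' or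
--     # whitespace and lowercasing characters as they are collected.
--     out = []
--     cur = []
--     for c in (tags or "") + ",":
--         if c in ",;" or c.isspace():
--             if cur:
--                 out.append("".join(cur))
--                 cur = []
--         else:
--             cur.append(c.lower())
--     return out
-- ===== Notes on version B (the rewrite author's own statement) =====
-- stated objective: alternative
-- what changed: Replaced A's multi-stage pipeline (replace ';'->',', split on ';', split on ',', strip, whitespace-split, filter, final lowercase map) by a single character-level scan that cuts tokens at any delimiter (',', ';' or whitespace) and lowercases characters as it collects them.
import Mathlib
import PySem

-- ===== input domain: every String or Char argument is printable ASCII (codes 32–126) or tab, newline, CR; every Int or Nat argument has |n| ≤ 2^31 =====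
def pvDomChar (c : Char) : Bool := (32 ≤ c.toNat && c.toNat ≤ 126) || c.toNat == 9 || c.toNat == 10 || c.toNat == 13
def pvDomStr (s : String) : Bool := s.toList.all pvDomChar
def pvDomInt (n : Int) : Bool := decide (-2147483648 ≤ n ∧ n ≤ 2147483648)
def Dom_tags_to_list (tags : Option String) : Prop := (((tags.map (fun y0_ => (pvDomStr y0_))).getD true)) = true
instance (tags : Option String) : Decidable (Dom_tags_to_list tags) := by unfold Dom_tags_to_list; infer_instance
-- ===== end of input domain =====

-- B replaces A's multi-stage replace/split/strip/split pipeline by a single character-level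
-- scan cutting tokens at ',', ';' or whitespace and lowercasing as it collects (alternative
-- decomposition, same cost); A and B are proved to return the same list for every input.

-- ===== PORT A =====
def tags_to_list (tags : Option String) : List String :=
  match tags with
  | none => []
  | some s =>
    if s.toList.isEmpty then []
    else
      let raw := ((PySem.Chars.splitOn (PySem.Chars.replace s.toList [';'] [',']) [';']).flatMap
                   (fun part => (PySem.Chars.splitOn part [',']).map PySem.Chars.strip))
      let output := raw.foldl (fun out item =>
          if item.isEmpty then out
          else out ++ (PySem.Chars.split₀ item).filter (fun t => !t.isEmpty)) []
      (output.map PySem.Chars.lower).map String.ofList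

-- ===== PORT B =====
def pvStepB (st : List (List Char) × List Char) (c : Char) : List (List Char) × List Char :=
  if c == ';' || c == ',' || PySem.Chars.isspace c then
    (if st.2.isEmpty then st.1 else st.1 ++ [st.2], [])
  else (st.1, st.2 ++ [PySem.Chars.lowerChar c])

def tags_to_list_alt (tags : Option String) : List String :=
  (((tags.getD "").toList ++ [',']).foldl pvStepB ([], [])).1.map String.ofList

-- token chars are not delimiters

-- ===== PRECONDITION & SPEC =====
def Spec_tags_to_list (tags : Option String) (out : List String) : Prop := out = tags_to_list_alt tags
instance (tags : Option String) (out : List String) : Decidable (Spec_tags_to_list tags out) := by unfold Spec_tags_to_list; infer_instance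

-- ===== CLAIM (what is proved, stated in full; the proofs are below) =====
def Claim_equal_tags_to_list : Prop := ∀ (tags : Option String), Dom_tags_to_list tags → Spec_tags_to_list tags (tags_to_list tags)

-- ===== LEMMAS AND PROOFS =====
def pvSub (c : Char) : Char := if c == ';' then ',' else c

def pvDelim (c : Char) : Bool := c == ';' || c == ',' || PySem.Chars.isspace c

def toksP (p : Char → Bool) (l : List Char) : List (List Char) :=
  (l.splitOnP p).filter (fun w => !w.isEmpty)

-- generic list facts

theorem modifyHead_append {α : Type} (f : α → α) (xs ys : List α) (h : xs ≠ []) :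
    (xs ++ ys).modifyHead f = xs.modifyHead f ++ ys := by
  cases xs with
  | nil => exact absurd rfl h
  | cons a t => simp

theorem map_modifyHead {α β : Type} (f : α → β) (g : α → α) (g' : β → β)
    (hc : ∀ a, f (g a) = g' (f a)) (l : List α) :
    (l.modifyHead g).map f = (l.map f).modifyHead g' := by
  cases l with
  | nil => simp
  | cons a t => simp [hc]

-- 1. replace

theorem replace_go_semi (l : List Char) : ∀ (fuel : Nat) (acc : List Char), l.length ≤ fuel →
    PySem.Chars.replace.go [';'] [','] fuel l acc = acc.reverse ++ l.map pvSub := by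
  induction l with
  | nil => intro fuel acc h; cases fuel <;> simp [PySem.Chars.replace.go]
  | cons c t ih =>
    intro fuel acc h
    cases fuel with
    | zero => simp at h
    | succ n =>
      by_cases hc : c = ';'
      · subst hc
        simp only [PySem.Chars.replace.go, List.isPrefixOf, BEq.rfl, Bool.true_and,
          List.isPrefixOf_nil_left, if_true, List.length_cons, List.length_nil, List.drop_succ_cons, List.drop_zero]
        rw [ih n _ (by simpa using h)]
        simp [pvSub]
      · have : ([';'].isPrefixOf (c :: t)) = false := by
          simp [List.isPrefixOf]; exact fun h' => hc h'.symm
        simp only [PySem.Chars.replace.go, this, Bool.false_eq_true, if_false]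
        rw [ih n _ (by simpa using h)]
        simp [pvSub, hc]

theorem replace_semi (cs : List Char) :
    PySem.Chars.replace cs [';'] [','] = cs.map pvSub := by
  simp [PySem.Chars.replace, replace_go_semi cs cs.length [] le_rfl]

-- 2. splitOn with absent sep

theorem splitOn_go_semi_no : ∀ (l : List Char) (fuel : Nat) (cur : List Char) (acc : List (List Char)),
    l.length ≤ fuel → ';' ∉ l →
    PySem.Chars.splitOn.go [';'] fuel l cur acc = ((cur.reverse ++ l) :: acc).reverse := by
  intro l
  induction l with
  | nil => intro fuel cur acc h hm; cases fuel <;> simp [PySem.Chars.splitOn.go]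
  | cons c t ih =>
    intro fuel cur acc h hm
    cases fuel with
    | zero => simp at h
    | succ n =>
      have hc : c ≠ ';' := fun h' => hm (h' ▸ List.mem_cons_self ..)
      have hpre : ([';'].isPrefixOf (c :: t)) = false := by
        simp [List.isPrefixOf]; exact fun h' => hc h'.symm
      simp only [PySem.Chars.splitOn.go, hpre, Bool.false_eq_true, if_false]
      rw [ih n _ _ (by simpa using h) (fun hmem => hm (List.mem_cons_of_mem _ hmem))]
      simp

theorem splitOn_semi_no (l : List Char) (hm : ';' ∉ l) :
    PySem.Chars.splitOn l [';'] = [l] := by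
  simp [PySem.Chars.splitOn, splitOn_go_semi_no l (l.length+1) [] [] (by omega) hm]

-- 3. splitOn by comma

theorem splitOn_go_comma : ∀ (l : List Char) (fuel : Nat) (cur : List Char) (acc : List (List Char)),
    l.length ≤ fuel →
    PySem.Chars.splitOn.go [','] fuel l cur acc
      = acc.reverse ++ (l.splitOnP (· == ',')).modifyHead (cur.reverse ++ ·) := by
  intro l
  induction l with
  | nil => intro fuel cur acc h; cases fuel <;> simp [PySem.Chars.splitOn.go]
  | cons c t ih =>
    intro fuel cur acc h
    cases fuel with
    | zero => simp at h
    | succ n =>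
      by_cases hc : c = ','
      · subst hc
        have hpre : ([','].isPrefixOf (',' :: t)) = true := by simp [List.isPrefixOf]
        simp only [PySem.Chars.splitOn.go, hpre, if_true, List.length_cons, List.length_nil,
          List.drop_succ_cons, List.drop_zero]
        rw [ih n _ _ (by simpa using h)]
        simp only [List.splitOnP_cons, beq_self_eq_true, if_true, List.reverse_nil,
          List.nil_append]
        cases hs : List.splitOnP (fun x => x == ',') t with
        | nil => exact absurd hs (List.splitOnP_ne_nil _ _)
        | cons a b => simp
      · have hpre : ([','].isPrefixOf (c :: t)) = false := by
          simp [List.isPrefixOf]; exact fun h' => hc h'.symm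
        simp only [PySem.Chars.splitOn.go, hpre, Bool.false_eq_true, if_false]
        rw [ih n _ _ (by simpa using h)]
        simp only [List.splitOnP_cons, hc, if_neg, beq_iff_eq, if_false,
          List.modifyHead_modifyHead, List.reverse_cons, List.append_assoc]
        rfl

theorem splitOn_comma (l : List Char) :
    PySem.Chars.splitOn l [','] = l.splitOnP (· == ',') := by
  rw [PySem.Chars.splitOn, splitOn_go_comma l (l.length+1) [] [] (by omega)]
  cases h : l.splitOnP (· == ',') with
  | nil => exact absurd h (List.splitOnP_ne_nil _ _)
  | cons a t => simp

-- 4. split₀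

theorem split₀_go : ∀ (l : List Char) (cur : List Char) (acc : List (List Char)),
    PySem.Chars.split₀.go l cur acc
      = acc.reverse ++ ((l.splitOnP PySem.Chars.isspace).modifyHead (cur.reverse ++ ·)).filter
          (fun w => !w.isEmpty) := by
  intro l
  induction l with
  | nil =>
    intro cur acc
    by_cases hc : cur = [] <;> simp [PySem.Chars.split₀.go, hc]
  | cons c t ih =>
    intro cur acc
    by_cases hs : PySem.Chars.isspace c
    · by_cases hc : cur = []
      · subst hc
        simp only [PySem.Chars.split₀.go, hs, if_true, List.isEmpty_nil]
        rw [ih [] acc]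
        simp only [List.splitOnP_cons, hs, if_true, List.reverse_nil, List.nil_append]
        cases hsp : List.splitOnP PySem.Chars.isspace t with
        | nil => exact absurd hsp (List.splitOnP_ne_nil _ _)
        | cons a b => simp
      · have : cur.isEmpty = false := by simpa [List.isEmpty_iff] using hc
        simp only [PySem.Chars.split₀.go, hs, if_true, this, Bool.false_eq_true, if_false]
        rw [ih [] (cur.reverse :: acc)]
        simp only [List.splitOnP_cons, hs, if_true, List.reverse_cons, List.append_assoc,
          List.reverse_nil, List.nil_append]
        cases hsp : List.splitOnP PySem.Chars.isspace t with
        | nil => exact absurd hsp (List.splitOnP_ne_nil _ _)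
        | cons a b =>
          have : cur.reverse.isEmpty = false := by simpa [List.isEmpty_iff] using hc
          simp [this]
    · simp only [PySem.Chars.split₀.go, hs, Bool.false_eq_true, if_false]
      rw [ih (c :: cur) acc]
      simp only [List.splitOnP_cons, hs, Bool.false_eq_true, if_false,
        List.modifyHead_modifyHead, List.reverse_cons, List.append_assoc]
      rfl

theorem split₀_eq (l : List Char) :
    PySem.Chars.split₀ l = (l.splitOnP PySem.Chars.isspace).filter (fun w => !w.isEmpty) := by
  rw [PySem.Chars.split₀, split₀_go l [] []]
  cases hsp : List.splitOnP PySem.Chars.isspace l with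
  | nil => exact absurd hsp (List.splitOnP_ne_nil _ _)
  | cons a b => simp

-- toks lemmas

theorem toks_head_delim (p : Char → Bool) (c : Char) (t : List Char) (h : p c = true) :
    toksP p (c :: t) = toksP p t := by
  simp [toksP, List.splitOnP_cons, h]

theorem toks_dropWhile (p : Char → Bool) (l : List Char) :
    toksP p (l.dropWhile p) = toksP p l := by
  induction l with
  | nil => rfl
  | cons c t ih =>
    by_cases h : p c
    · rw [List.dropWhile_cons_of_pos h, ih, toks_head_delim p c t h]
    · rw [List.dropWhile_cons_of_neg h]

theorem splitOnP_append_allP (p : Char → Bool) (a s : List Char) (hs : ∀ c ∈ s, p c = true) :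
    (a ++ s).splitOnP p = a.splitOnP p ++ List.replicate s.length [] := by
  induction a with
  | nil =>
    simp only [List.nil_append, List.splitOnP_nil]
    induction s with
    | nil => simp
    | cons c t ih =>
      have hc := hs c (List.mem_cons_self ..)
      rw [List.splitOnP_cons, if_pos hc, ih (fun x hx => hs x (List.mem_cons_of_mem _ hx))]
      simp [List.replicate_succ]
  | cons c a' ih =>
    by_cases h : p c
    · simp [List.splitOnP_cons, h, ih]
    · simp only [List.cons_append, List.splitOnP_cons, h, Bool.false_eq_true, if_false, ih]
      rw [modifyHead_append _ _ _ (List.splitOnP_ne_nil _ _)]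

theorem toks_append_allP (p : Char → Bool) (a s : List Char) (hs : ∀ c ∈ s, p c = true) :
    toksP p (a ++ s) = toksP p a := by
  simp [toksP, splitOnP_append_allP p a s hs, List.filter_append, List.filter_replicate]

theorem toks_strip (l : List Char) :
    toksP PySem.Chars.isspace (PySem.Chars.strip l) = toksP PySem.Chars.isspace l := by
  have hr : ∀ m : List Char, toksP PySem.Chars.isspace (PySem.Chars.rstrip m)
      = toksP PySem.Chars.isspace m := by
    intro m
    have hdecomp : m = PySem.Chars.rstrip m
        ++ (List.takeWhile PySem.Chars.isspace m.reverse).reverse := by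
      rw [PySem.Chars.rstrip, ← List.reverse_append]
      conv_lhs => rw [← m.reverse_reverse, ← List.takeWhile_append_dropWhile
        (p := PySem.Chars.isspace) (l := m.reverse)]
    conv_rhs => rw [hdecomp]
    rw [toks_append_allP]
    intro c hc
    exact List.mem_takeWhile_imp (by simpa using hc)
  rw [PySem.Chars.strip, hr, PySem.Chars.lstrip, toks_dropWhile]

-- 5. splitOnP through map

theorem splitOnP_map (p : Char → Bool) (f : Char → Char) (l : List Char) :
    (l.map f).splitOnP p = (l.splitOnP (fun c => p (f c))).map (List.map f) := by
  induction l with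
  | nil => simp
  | cons c t ih =>
    by_cases h : p (f c)
    · simp [List.splitOnP_cons, h, ih]
    · simp only [List.map_cons, List.splitOnP_cons, h, Bool.false_eq_true, if_false, ih]
      rw [map_modifyHead (List.map f) (List.cons c) (List.cons (f c)) (by intro a; simp)]

-- 6. splitOnP composition

theorem splitOnP_comp (p q : Char → Bool) (l : List Char) :
    (l.splitOnP q).flatMap (List.splitOnP p) = l.splitOnP (fun c => q c || p c) := by
  induction l with
  | nil => simp
  | cons c t ih =>
    by_cases hq : q c
    · simp [List.splitOnP_cons, hq, ih]
    · by_cases hp : p c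
      · simp only [List.splitOnP_cons, hq, hp, Bool.false_eq_true, if_false, Bool.false_or,
          if_true]
        cases hsp : List.splitOnP q t with
        | nil => exact absurd hsp (List.splitOnP_ne_nil _ _)
        | cons a b =>
          rw [← ih, hsp]
          simp [List.splitOnP_cons, hp]
      · simp only [List.splitOnP_cons, hq, hp, Bool.false_eq_true, if_false, Bool.false_or]
        cases hsp : List.splitOnP q t with
        | nil => exact absurd hsp (List.splitOnP_ne_nil _ _)
        | cons a b =>
          rw [← ih, hsp]
          simp only [List.modifyHead_cons, List.flatMap_cons, List.splitOnP_cons, hp,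
            Bool.false_eq_true, if_false]
          rw [modifyHead_append _ _ _ (List.splitOnP_ne_nil _ _)]

-- filter of flatMap

theorem filter_flatMap' {α β : Type} (P : β → Bool) (f : α → List β) (l : List α) :
    (l.flatMap f).filter P = l.flatMap (fun x => (f x).filter P) := by
  induction l with
  | nil => rfl
  | cons a t ih => simp [List.flatMap_cons, List.filter_append, ih]

-- ports

theorem splitOnP_mem_not (p : Char → Bool) (l : List Char) :
    ∀ w ∈ l.splitOnP p, ∀ c ∈ w, p c = false := by
  induction l with
  | nil => intro w hw c hc; simp at hw; subst hw; simp at hc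
  | cons a t ih =>
    intro w hw c hc
    by_cases ha : p a
    · rw [List.splitOnP_cons, if_pos ha] at hw
      rcases List.mem_cons.mp hw with hw | hw
      · subst hw; simp at hc
      · exact ih w hw c hc
    · rw [List.splitOnP_cons, if_neg (by simpa using ha)] at hw
      cases hsp : List.splitOnP p t with
      | nil => exact absurd hsp (List.splitOnP_ne_nil _ _)
      | cons x b =>
        rw [hsp] at hw
        simp only [List.modifyHead_cons, List.mem_cons] at hw
        rcases hw with hw | hw
        · subst hw
          rcases List.mem_cons.mp hc with hc | hc
          · subst hc; simpa using ha
          · exact ih x (by rw [hsp]; exact List.mem_cons_self ..) c hc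
        · exact ih w (by rw [hsp]; exact List.mem_cons_of_mem _ hw) c hc

-- foldl with skip-empty = flatMap

theorem foldl_skip_empty (X : List Char → List (List Char)) (hX : X [] = []) :
    ∀ (raw : List (List Char)) (init : List (List Char)),
    raw.foldl (fun out item => if item.isEmpty then out else out ++ X item) init
      = init ++ raw.flatMap X := by
  intro raw
  induction raw with
  | nil => intro init; simp
  | cons a t ih =>
    intro init
    simp only [List.foldl_cons, List.flatMap_cons]
    by_cases ha : a.isEmpty = true
    · rw [if_pos ha, ih, List.isEmpty_iff.mp ha, hX, List.nil_append]
    · rw [if_neg ha, ih, List.append_assoc]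

theorem pvDelim_comp_sub : (fun c => (pvSub c == ',' || PySem.Chars.isspace (pvSub c))) = pvDelim := by
  funext c
  by_cases h : c = ';'
  · subst h; simp [pvSub, pvDelim]
  · have h' : (c == ';') = false := by simpa using h
    simp [pvSub, pvDelim, h', h]

-- A core

theorem A_core (cs : List Char) :
    (((PySem.Chars.splitOn (PySem.Chars.replace cs [';'] [',']) [';']).flatMap
        (fun part => (PySem.Chars.splitOn part [',']).map PySem.Chars.strip)).foldl
        (fun out item => if item.isEmpty then out
          else out ++ (PySem.Chars.split₀ item).filter (fun t => !t.isEmpty)) [])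
     = toksP pvDelim cs := by
  rw [replace_semi, splitOn_semi_no _ (by
    intro hmem
    rcases List.mem_map.mp hmem with ⟨c, _, hc⟩
    by_cases h : c = ';' <;> simp [pvSub, h] at hc)]
  rw [foldl_skip_empty _ (by simp [PySem.Chars.split₀, PySem.Chars.split₀.go]) _ []]
  rw [List.nil_append, List.flatMap_cons, List.flatMap_nil, List.append_nil, splitOn_comma,
    List.flatMap_map]
  have hX : ∀ p : List Char,
      ((PySem.Chars.split₀ (PySem.Chars.strip p)).filter (fun t => !t.isEmpty))
        = toksP PySem.Chars.isspace p := by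
    intro p
    rw [split₀_eq, List.filter_filter, ← toks_strip, toksP]
    congr 1
    funext a
    simp
  simp only [hX]
  have hfm : List.flatMap (fun p => toksP PySem.Chars.isspace p)
      (cs.map pvSub |>.splitOnP (· == ','))
      = ((cs.map pvSub |>.splitOnP (· == ',')).flatMap
          (List.splitOnP PySem.Chars.isspace)).filter (fun w => !w.isEmpty) := by
    rw [filter_flatMap']
    simp [toksP]
  rw [hfm, splitOnP_comp, splitOnP_map, pvDelim_comp_sub, List.filter_map]
  have hpf : ((cs.splitOnP pvDelim).filter ((fun w => !w.isEmpty) ∘ List.map pvSub))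
      = toksP pvDelim cs := by
    rw [toksP]
    congr 1
    funext w
    simp
  rw [hpf]
  have hid : ∀ w ∈ toksP pvDelim cs, List.map pvSub w = w := by
    intro w hw
    have hw' : w ∈ cs.splitOnP pvDelim := List.mem_of_mem_filter hw
    have hnd := splitOnP_mem_not pvDelim cs w hw'
    have : ∀ c ∈ w, pvSub c = c := by
      intro c hc
      have h1 : pvDelim c = false := hnd c hc
      have h2 : c ≠ ';' := by
        intro h; subst h; simp [pvDelim] at h1
      simp [pvSub, h2]
    calc List.map pvSub w = List.map id w := List.map_congr_left (fun c hc => this c hc)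
      _ = w := List.map_id w
  conv_rhs => rw [← List.map_id (toksP pvDelim cs)]
  exact List.map_congr_left (fun w hw => by rw [hid w hw]; rfl)

-- B invariant

theorem B_go : ∀ (l : List Char) (cur : List Char) (out : List (List Char)),
    ((l ++ [',']).foldl pvStepB (out, cur)).1
      = out ++ (((l.splitOnP pvDelim).map (List.map PySem.Chars.lowerChar)).modifyHead
          (cur ++ ·)).filter (fun w => !w.isEmpty) := by
  intro l
  induction l with
  | nil =>
    intro cur out
    by_cases hc : cur.isEmpty = true
    · simp [pvStepB, List.isEmpty_iff.mp hc]
    · simp [pvStepB, hc]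
  | cons c t ih =>
    intro cur out
    by_cases hd : pvDelim c = true
    · have hstep : pvStepB (out, cur) c
          = (if cur.isEmpty then out else out ++ [cur], []) := by
        simp only [pvStepB, pvDelim] at hd ⊢
        rw [if_pos hd]
      rw [List.cons_append, List.foldl_cons, hstep, ih]
      rw [List.splitOnP_cons, if_pos hd]
      cases hsp : List.splitOnP pvDelim t with
      | nil => exact absurd hsp (List.splitOnP_ne_nil _ _)
      | cons a b =>
        by_cases hc : cur.isEmpty = true
        · simp [List.isEmpty_iff.mp hc]
        · simp [hc]
    · have hstep : pvStepB (out, cur) c = (out, cur ++ [PySem.Chars.lowerChar c]) := by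
        simp only [pvStepB, pvDelim] at hd ⊢
        rw [if_neg (by simpa using hd)]
      rw [List.cons_append, List.foldl_cons, hstep, ih]
      rw [List.splitOnP_cons, if_neg (by simpa using hd)]
      rw [map_modifyHead (List.map PySem.Chars.lowerChar) (List.cons c)
        (List.cons (PySem.Chars.lowerChar c)) (by intro a; simp)]
      rw [List.modifyHead_modifyHead]
      have hfun : (fun x => cur ++ [PySem.Chars.lowerChar c] ++ x)
          = ((fun x => cur ++ x) ∘ List.cons (PySem.Chars.lowerChar c)) := by
        funext x; simp
      rw [hfun]

-- main A = B on char level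

theorem main_eq (tags : Option String) : tags_to_list tags = tags_to_list_alt tags := by
  cases tags with
  | none => rfl
  | some s =>
    rw [tags_to_list, tags_to_list_alt]
    by_cases he : s.toList.isEmpty = true
    · rw [if_pos he, Option.getD_some, List.isEmpty_iff.mp he]
      rfl
    · rw [if_neg he, Option.getD_some, B_go s.toList [] []]
      dsimp only []
      rw [A_core s.toList]
      have hmod : List.modifyHead (fun x => [] ++ x)
          (List.map (List.map PySem.Chars.lowerChar) (List.splitOnP pvDelim s.toList))
          = List.map (List.map PySem.Chars.lowerChar) (List.splitOnP pvDelim s.toList) := by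
        cases (List.map (List.map PySem.Chars.lowerChar) (List.splitOnP pvDelim s.toList)) <;> simp
      rw [hmod, List.nil_append, List.filter_map]
      have hpred : ((fun w => !w.isEmpty) ∘ List.map PySem.Chars.lowerChar)
          = (fun w : List Char => !w.isEmpty) := by funext w; simp
      rw [hpred, toksP]
      simp [PySem.Chars.lower, List.map_map]

-- ===== VERDICT (by name: the statement is the Claim_ definition above) =====
theorem tags_to_list_spec : Claim_equal_tags_to_list := by
  intro tags _
  unfold Spec_tags_to_list
  exact main_eq tags
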